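-- pv_equiv track=rewrite | github.com/jrdunkley/observer-geometry | src/nomogeo/empirical_kernel_jet.py | _multi_indices_exact
-- ===== SOURCE A (Python) =====
-- def _multi_indices_exact(dim: int, total_deg: int) -> list[tuple[int, ...]]:
--     """Generate all multi-indices of exactly total_deg in dim variables."""
--     if dim == 0:
--         return [()] if total_deg == 0 else []
--     if dim == 1:
--         return [(total_deg,)]
--     result = []
--     for first in range(total_deg + 1):
--         for rest in _multi_indices_exact(dim - 1, total_deg - first):
--             result.append((first,) + rest)
--     return result
-- ===== SOURCE B (Python) =====
-- def _multi_indices_exact(dim: int, total_deg: int) -> list[tuple[int, ...]]: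
--     """Generate all multi-indices of exactly total_deg in dim variables.
--
--     Bottom-up dynamic programming over the number of variables instead of
--     top-down recursion: table[d] holds all multi-indices of degree d in the
--     current number of variables; each pass prepends one more variable, and
--     the last variable is combined directly into the single requested degree.
--     """
--     if dim == 0:
--         return [()] if total_deg == 0 else []
--     if total_deg < 0:
--         return []
--     if dim == 1:
--         return [(total_deg,)]
--     table = [[(d,)] for d in range(total_deg + 1)]  # one variable
--     for _ in range(dim - 2):
--         table = [[(first,) + rest
--                   for first in range(d + 1)
--                   for rest in table[d - first]]
--                  for d in range(total_deg + 1)]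
--     return [(first,) + rest
--             for first in range(total_deg + 1)
--             for rest in table[total_deg - first]]
-- ===== Notes on version B (the rewrite author's own statement) =====
-- stated objective: alternative
-- what changed: Replaces the top-down recursion over the first coordinate by a bottom-up dynamic-programming pass: a table of all multi-indices per degree in k variables is rebuilt for each added variable, and the entry for total_deg is returned.
-- intended difference: For dim == 1 with total_deg < 0, A returns [(total_deg,)] -- a 'multi-index' with a negative entry, inconsistent with the [] it returns for every other dim at negative degree -- while B returns [], the intended empty enumeration since no multi-index has a negative total degree. — e.g. on _multi_indices_exact(1, -1): A returns [[-1]], B returns []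
-- outside the precondition, e.g. on _multi_indices_exact(-1, 2): A raises RecursionError, B returns [(0, 2), (1, 1), (2, 0)]
import Mathlib
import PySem

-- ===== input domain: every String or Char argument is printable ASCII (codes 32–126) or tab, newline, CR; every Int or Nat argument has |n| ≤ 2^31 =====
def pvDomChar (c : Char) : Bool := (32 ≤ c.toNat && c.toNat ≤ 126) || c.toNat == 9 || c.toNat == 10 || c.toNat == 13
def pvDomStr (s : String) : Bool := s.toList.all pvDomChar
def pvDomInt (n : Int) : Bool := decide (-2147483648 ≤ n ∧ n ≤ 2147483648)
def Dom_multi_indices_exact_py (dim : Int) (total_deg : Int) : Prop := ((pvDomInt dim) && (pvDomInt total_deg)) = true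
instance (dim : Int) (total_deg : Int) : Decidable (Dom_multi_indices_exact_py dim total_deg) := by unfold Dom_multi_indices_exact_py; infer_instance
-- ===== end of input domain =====

-- B replaces A's top-down recursion by a bottom-up DP table over the number of variables
-- (objective: alternative implementation of the same enumeration, same output order).


-- ===== PORT A =====
-- Fuel = dim.toNat; it runs out only for dim < 0 with total_deg ≥ 0, where the Python
-- recurses forever (outside Pre_); for total_deg < 0 the range is empty and fuel is unused.
def pvMultiA : Nat → Int → Int → List (List Int)
  | fuel, dim, total_deg =>
    if dim = 0 then (if total_deg = 0 then [[]] else [])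
    else if dim = 1 then [[total_deg]]
    else
      match fuel with
      | 0 => []
      | f + 1 =>
        (PySem.List.pyRange 0 (total_deg + 1) 1).foldl
          (fun result first =>
            result ++ (pvMultiA f (dim - 1) (total_deg - first)).map (fun rest => first :: rest))
          []

def multi_indices_exact_py (dim : Int) (total_deg : Int) : List (List Int) :=
  pvMultiA dim.toNat dim total_deg

-- ===== PORT B =====
-- One DP pass: from the degree-indexed table for k variables to the table for k+1 variables.
def pvStepB (total_deg : Int) (table : List (List (List Int))) : List (List (List Int)) :=
  (PySem.List.pyRange 0 (total_deg + 1) 1).map (fun d =>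
    (PySem.List.pyRange 0 (d + 1) 1).flatMap (fun first =>
      (PySem.List.pyGetD table (d - first) []).map (fun rest => first :: rest)))

def multi_indices_exact_py_alt (dim : Int) (total_deg : Int) : List (List Int) :=
  if dim = 0 then (if total_deg = 0 then [[]] else [])
  else if total_deg < 0 then []
  else if dim = 1 then [[total_deg]]
  else
    let table :=
      (PySem.List.pyRange 0 (dim - 2) 1).foldl
        (fun table _ => pvStepB total_deg table)
        ((PySem.List.pyRange 0 (total_deg + 1) 1).map (fun d => [[d]]))
    (PySem.List.pyRange 0 (total_deg + 1) 1).flatMap (fun first =>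
        (PySem.List.pyGetD table (total_deg - first) []).map (fun rest => first :: rest))

-- ===== PRECONDITION & SPEC =====
-- Pre_ excludes exactly the inputs where A never returns: for dim < 0 with total_deg ≥ 0
-- the recursion never reaches a base case (RecursionError).
def Pre_multi_indices_exact_py (dim : Int) (total_deg : Int) : Prop := 0 ≤ dim ∨ total_deg < 0
instance (dim : Int) (total_deg : Int) : Decidable (Pre_multi_indices_exact_py dim total_deg) := by unfold Pre_multi_indices_exact_py; infer_instance
def pvWitness_multi_indices_exact_py : Int × Int := (3, 2)

-- For dim == 1 with total_deg < 0, A returns [(total_deg,)] — a 'multi-index' with a negative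
-- entry, inconsistent with the [] it returns for every other dim at negative degree — while B
-- returns [], the intended empty enumeration: no multi-index has a negative total degree.
def D_multi_indices_exact_py (dim : Int) (total_deg : Int) : Prop := dim = 1 ∧ total_deg < 0
instance (dim : Int) (total_deg : Int) : Decidable (D_multi_indices_exact_py dim total_deg) := by unfold D_multi_indices_exact_py; infer_instance

def Spec_multi_indices_exact_py (dim : Int) (total_deg : Int) (out : List (List Int)) : Prop := ¬ D_multi_indices_exact_py dim total_deg → out = multi_indices_exact_py_alt dim total_deg
instance (dim : Int) (total_deg : Int) (out : List (List Int)) : Decidable (Spec_multi_indices_exact_py dim total_deg out) := by unfold Spec_multi_indices_exact_py; infer_instance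

def pvDiffWitness_multi_indices_exact_py : Int × Int := (1, -1)
def pvDiffWitnessOut_multi_indices_exact_py : (List (List Int)) × (List (List Int)) := ([[-1]], [])

-- ===== CLAIM (what is proved, stated in full; the proofs are below) =====
def Claim_unchanged_multi_indices_exact_py : Prop := ∀ (dim : Int) (total_deg : Int), Dom_multi_indices_exact_py dim total_deg → Pre_multi_indices_exact_py dim total_deg → Spec_multi_indices_exact_py dim total_deg (multi_indices_exact_py dim total_deg)
def Claim_changed_multi_indices_exact_py : Prop := Dom_multi_indices_exact_py (pvDiffWitness_multi_indices_exact_py.1) (pvDiffWitness_multi_indices_exact_py.2) ∧ Pre_multi_indices_exact_py (pvDiffWitness_multi_indices_exact_py.1) (pvDiffWitness_multi_indices_exact_py.2) ∧ D_multi_indices_exact_py (pvDiffWitness_multi_indices_exact_py.1) (pvDiffWitness_multi_indices_exact_py.2) ∧ multi_indices_exact_py (pvDiffWitness_multi_indices_exact_py.1) (pvDiffWitness_multi_indices_exact_py.2) = pvDiffWitnessOut_multi_indices_exact_py.1 ∧ multi_indices_exact_py_alt (pvDiffWitness_multi_indices_exact_py.1) (pvDiffWitness_multi_indices_exact_py.2)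 = pvDiffWitnessOut_multi_indices_exact_py.2 ∧ pvDiffWitnessOut_multi_indices_exact_py.1 ≠ pvDiffWitnessOut_multi_indices_exact_py.2
def Claim_exact_multi_indices_exact_py : Prop := ∀ (dim : Int) (total_deg : Int), Dom_multi_indices_exact_py dim total_deg → Pre_multi_indices_exact_py dim total_deg → D_multi_indices_exact_py dim total_deg → multi_indices_exact_py dim total_deg ≠ multi_indices_exact_py_alt dim total_deg

-- ===== LEMMAS AND PROOFS =====

-- A's inner loop of appends is a flatMap.
theorem pvMultiA_flat (f : Nat) (dim total_deg : Int) (h0 : dim ≠ 0) (h1 : dim ≠ 1) :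
    pvMultiA (f + 1) dim total_deg =
      (PySem.List.pyRange 0 (total_deg + 1) 1).flatMap
        (fun first => (pvMultiA f (dim - 1) (total_deg - first)).map (fun rest => first :: rest)) := by
  rw [pvMultiA]
  simp [h0, h1, List.flatMap_def]

-- A's value at k+1 variables with matching fuel.
def pvANat (k : Nat) (d : Int) : List (List Int) := pvMultiA (k + 1) ((k : Int) + 1) d

theorem pvANat_zero (d : Int) : pvANat 0 d = [[d]] := by
  simp [pvANat, pvMultiA]

theorem pvANat_succ (k : Nat) (d : Int) :
    pvANat (k + 1) d =
      (PySem.List.pyRange 0 (d + 1) 1).flatMap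
        (fun first => (pvANat k (d - first)).map (fun rest => first :: rest)) := by
  unfold pvANat
  rw [show ((k + 1 : Nat) : Int) + 1 = ((k : Int) + 1) + 1 by push_cast; ring]
  rw [pvMultiA_flat (k + 1) _ _ (by omega) (by omega)]
  simp

-- B's DP step maps A's table for k variables to A's table for k+1 variables.
theorem pvStepB_map (k : Nat) (total_deg : Int) :
    pvStepB total_deg ((PySem.List.pyRange 0 (total_deg + 1) 1).map (fun d => pvANat k d)) =
      (PySem.List.pyRange 0 (total_deg + 1) 1).map (fun d => pvANat (k + 1) d) := by
  unfold pvStepB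
  apply List.map_congr_left
  intro d hd
  rw [PySem.List.mem_pyRange_one] at hd
  rw [pvANat_succ]
  rw [List.flatMap_def, List.flatMap_def]
  congr 1
  apply List.map_congr_left
  intro first hf
  rw [PySem.List.mem_pyRange_one] at hf
  rw [PySem.List.pyGetD_map_pyRange_of_nonneg _ _ _ _ (by omega) (by omega)]

-- B's foldl ignores the loop variable: it is an iterate.
theorem pvFoldl_iterate (total_deg : Int) (l : List Int) (t : List (List (List Int))) :
    l.foldl (fun t _ => pvStepB total_deg t) t = (pvStepB total_deg)^[l.length] t := by
  induction l generalizing t with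
  | nil => rfl
  | cons x xs ih => simp [List.foldl_cons, ih, Function.iterate_succ_apply]

-- The loop invariant: after k DP passes the table is A's table for k+1 variables.
theorem pvTable_inv (k : Nat) (total_deg : Int) :
    (pvStepB total_deg)^[k] ((PySem.List.pyRange 0 (total_deg + 1) 1).map (fun d => [[d]])) =
      (PySem.List.pyRange 0 (total_deg + 1) 1).map (fun d => pvANat k d) := by
  induction k with
  | zero => simp [pvANat_zero]
  | succ k ih => rw [Function.iterate_succ_apply', ih, pvStepB_map]

-- The two ports agree on the whole natural domain dim ≥ 0, total_deg ≥ 0.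
theorem pvMainEq (dim total_deg : Int) (hd : 0 ≤ dim) (ht : 0 ≤ total_deg) :
    multi_indices_exact_py dim total_deg = multi_indices_exact_py_alt dim total_deg := by
  unfold multi_indices_exact_py multi_indices_exact_py_alt
  by_cases h0 : dim = 0
  · subst h0
    simp [pvMultiA]
  · by_cases h1 : dim = 1
    · subst h1
      simp [pvMultiA, show ¬ total_deg < 0 by omega]
    · rw [if_neg h0, if_neg (by omega : ¬ total_deg < 0), if_neg h1]
      rw [pvFoldl_iterate, PySem.List.length_pyRange_one]
      rw [show dim - 2 - 0 = dim - 2 by ring]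
      rw [pvTable_inv]
      have hrhs :
          (PySem.List.pyRange 0 (total_deg + 1) 1).flatMap (fun first =>
              (PySem.List.pyGetD
                ((PySem.List.pyRange 0 (total_deg + 1) 1).map
                  (fun d => pvANat (dim - 2).toNat d)) (total_deg - first) []).map
                (fun rest => first :: rest)) =
            (PySem.List.pyRange 0 (total_deg + 1) 1).flatMap (fun first =>
              (pvANat (dim - 2).toNat (total_deg - first)).map (fun rest => first :: rest)) := by
        rw [List.flatMap_def, List.flatMap_def]
        congr 1
        apply List.map_congr_left
        intro first hf
        rw [PySem.List.mem_pyRange_one] at hf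
        rw [PySem.List.pyGetD_map_pyRange_of_nonneg _ _ _ _ (by omega) (by omega)]
      rw [hrhs, ← pvANat_succ]
      unfold pvANat
      rw [show (dim - 2).toNat + 1 + 1 = dim.toNat by omega,
          show (((dim - 2).toNat + 1 : Nat) : Int) + 1 = dim by omega]

-- At negative total degree both ports return [] as soon as dim ≠ 1 (A: empty range; B: guard).
theorem pvNegEq (dim total_deg : Int) (ht : total_deg < 0) (h1 : dim ≠ 1) :
    multi_indices_exact_py dim total_deg = multi_indices_exact_py_alt dim total_deg := by
  unfold multi_indices_exact_py multi_indices_exact_py_alt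
  have hr : PySem.List.pyRange 0 (total_deg + 1) 1 = [] :=
    PySem.List.pyRange_one_eq_nil (by omega)
  by_cases h0 : dim = 0
  · subst h0
    simp [pvMultiA, show total_deg ≠ 0 by omega]
  · rw [pvMultiA.eq_def]
    cases dim.toNat <;> simp [h0, h1, ht, hr]

-- ===== VERDICT (by name: the statement is the Claim_ definition above) =====
theorem multi_indices_exact_py_spec : Claim_unchanged_multi_indices_exact_py := by
  intro dim total_deg _hdom hpre
  unfold Spec_multi_indices_exact_py
  intro hD
  rcases Int.lt_or_le total_deg 0 with hneg | hpos
  · exact pvNegEq dim total_deg hneg (fun h => hD ⟨h, hneg⟩)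
  · rcases hpre with hd | hlt
    · exact pvMainEq dim total_deg hd hpos
    · omega

theorem multi_indices_exact_py_changed : Claim_changed_multi_indices_exact_py := by
  unfold Claim_changed_multi_indices_exact_py; decide

theorem multi_indices_exact_py_tight : Claim_exact_multi_indices_exact_py := by
  intro dim total_deg _hdom _hpre hD
  obtain ⟨h1, ht⟩ := hD
  subst h1
  simp [multi_indices_exact_py, multi_indices_exact_py_alt, pvMultiA, ht]
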